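-- pv_equiv track=rewrite | github.com/youth4ever/orion | Project EULER/pb122 - Efficient exponentiation.py | response
-- ===== SOURCE A (Python) =====
-- def response(N):
--      L = [i-1 for i in range(N+1)]
--      L[0] = 0
--      dec = [(1,)]
--      decnext = []
--      C = N-3
--      i = 0
--      while C > 0:
--          i+=1
--          for d in dec:
--              total = sum(d)
--              s = 0
--              t = list(d)
--              for v in d:
--                  s+=v
--                  if total + s <= N and L[total +s] >= i:
--                      t.append(s)
--                      decnext.append(tuple(t))
--                      t.pop()
--                      if L[total+s] > i:
--                         L[total+s] = i
--                         C-=1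
--          dec, decnext = decnext, []
--      print (L)
--      return sum(L)
-- ===== SOURCE B (Python) =====
-- def response(N):
--     L = [i - 1 for i in range(N + 1)]
--     L[0] = 0
--
--     def dfs(chain, last, depth, budget, remaining):
--         # try extending the chain by last + (each earlier chain value)
--         for v in chain:
--             c = last + v
--             if c <= N and L[c] >= depth:
--                 if depth == budget:
--                     if L[c] > depth:
--                         L[c] = depth
--                         remaining -= 1
--                 else:
--                     chain.append(c)
--                     remaining = dfs(chain, c, depth + 1, budget, remaining)
--                     chain.pop()
--         return remaining
--
--     remaining = N - 3
--     budget = 0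
--     while remaining > 0:
--         budget += 1
--         remaining = dfs([1], 1, 1, budget, remaining)
--     print(L)
--     return sum(L)
-- ===== Notes on version B (the rewrite author's own statement) =====
-- stated objective: alternative
-- what changed: Replaced A's stored breadth-first frontier (list of all surviving chains per level, rebuilt via tuple copies and per-chain prefix-sum passes) by an iterative-deepening depth-first backtracking search that recomputes chains from the root [1] for each depth budget, keeping only the current chain in memory.
import Mathlib
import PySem

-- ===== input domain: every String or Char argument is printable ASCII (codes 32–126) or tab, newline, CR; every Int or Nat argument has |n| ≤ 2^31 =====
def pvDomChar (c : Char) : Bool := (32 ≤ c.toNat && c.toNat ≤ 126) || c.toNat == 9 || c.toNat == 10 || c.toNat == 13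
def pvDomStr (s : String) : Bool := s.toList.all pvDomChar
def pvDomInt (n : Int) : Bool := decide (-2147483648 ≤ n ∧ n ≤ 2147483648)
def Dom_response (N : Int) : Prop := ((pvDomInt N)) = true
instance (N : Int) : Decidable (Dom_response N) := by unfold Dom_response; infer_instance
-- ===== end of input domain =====

-- B replaces A's stored BFS frontier by an iterative-deepening depth-first search (same minima, no frontier
-- list); equivalence is about the RETURN value only (both Pythons also print the same final L array).

-- Python list indexing / element assignment is O(1): ported with Array (same argument order as
-- PySem's pyGetD/pySetD). Exact on every access the ports perform: under the guards all indices i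
-- satisfy 0 <= i <= N (chain values are positive), and L has N+1 entries; for N < 0 Python raises
-- IndexError at 'L[0] = 0' (outside Pre_).
def pvGet (L : Array Int) (i : Int) (d : Int) : Int := L.getD i.toNat d
def pvSet (L : Array Int) (i : Int) (v : Int) : Array Int := L.setIfInBounds i.toNat v

-- ===== PORT A =====
-- A's inner loop: t.append(s); decnext.append(tuple(t)); t.pop() — the appended tuple is d ++ [s].
-- chain processing: state (s, decnext, L, C), folding over the tuple d of increments
def chainA (N i : Int) (d : List Int) (dn : Array (List Int)) (L : Array Int) (C : Int) :
    Array (List Int) × Array Int × Int :=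
  let total := d.sum
  (d.foldl (fun (st : Int × Array (List Int) × Array Int × Int) v =>
    let s := st.1 + v
    if total + s ≤ N ∧ i ≤ pvGet st.2.2.1 (total + s) 0 then
      if i < pvGet st.2.2.1 (total + s) 0 then
        (s, st.2.1.push (d ++ [s]), pvSet st.2.2.1 (total + s) i, st.2.2.2 - 1)
      else (s, st.2.1.push (d ++ [s]), st.2.2.1, st.2.2.2)
    else (s, st.2.1, st.2.2.1, st.2.2.2)) (0, dn, L, C)).2

-- one pass of 'for d in dec'
def levelA (N i : Int) (dec : Array (List Int)) (L : Array Int) (C : Int) :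
    Array (List Int) × Array Int × Int :=
  dec.foldl (fun st d => chainA N i d st.1 st.2.1 st.2.2) (#[], L, C)

-- 'while C > 0' — fuel only makes the loop total; N+2 strictly exceeds the number of levels Python runs
def loopA (N : Int) : Nat → Int → Array (List Int) → Array Int → Int → Array Int × Int
  | 0, _, _, L, C => (L, C)
  | fuel+1, i, dec, L, C =>
    if 0 < C then
      let st := levelA N (i + 1) dec L C
      loopA N fuel (i + 1) st.1 st.2.1 st.2.2
    else (L, C)

def response (N : Int) : Int :=
  let L0 := ((PySem.List.pyRange 0 (N + 1) 1).map (fun j => j - 1)).toArray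
  let L1 := pvSet L0 0 0     -- the initial assignment (IndexError for negative N: outside Pre_)
  (loopA N (N.toNat + 2) 0 ([[1]] : List (List Int)).toArray L1 (N - 3)).1.toList.sum

-- ===== PORT B =====
-- depth-first search with a depth budget; chain is the list of chain VALUES, oldest first.
-- structural fuel = budget - depth + 1 (the recursion depth of the Python dfs); it only makes dfs total.
def dfsB (N : Int) : Nat → List Int → Int → Int → Int → Array Int × Int → Array Int × Int
  | 0, _, _, _, _, st => st
  | k+1, chain, last, depth, budget, st =>
    chain.foldl (fun (st : Array Int × Int) v =>
      let c := last + v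
      if c ≤ N ∧ depth ≤ pvGet st.1 c 0 then
        if depth = budget then
          if depth < pvGet st.1 c 0 then
            (pvSet st.1 c depth, st.2 - 1)
          else st
        else dfsB N k (chain ++ [c]) c (depth + 1) budget st
      else st) st

-- 'while remaining > 0: budget += 1; remaining = dfs([1], 1, 1, budget, remaining)'
def loopB (N : Int) : Nat → Int → Array Int × Int → Array Int × Int
  | 0, _, st => st
  | fuel+1, budget, st =>
    if 0 < st.2 then
      loopB N fuel (budget + 1) (dfsB N (budget + 1).toNat [1] 1 1 (budget + 1) st)
    else st

def response_alt (N : Int) : Int :=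
  let L0 := ((PySem.List.pyRange 0 (N + 1) 1).map (fun j => j - 1)).toArray
  let L1 := pvSet L0 0 0
  (loopB N (N.toNat + 2) 0 (L1, N - 3)).1.toList.sum

-- ===== PRECONDITION & SPEC =====
-- Pre_: exactly where Python A returns; for negative N the list L is empty and the initial
-- assignment into it raises IndexError (in B as well).
def Pre_response (N : Int) : Prop := 0 ≤ N
instance (N : Int) : Decidable (Pre_response N) := by unfold Pre_response; infer_instance
def pvWitness_response : Int := 5

def Spec_response (N : Int) (out : Int) : Prop := out = response_alt N
instance (N : Int) (out : Int) : Decidable (Spec_response N out) := by unfold Spec_response; infer_instance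

-- ===== CLAIM (what is proved, stated in full; the proofs are below) =====
def Claim_equal_response : Prop := ∀ (N : Int), Dom_response N → Pre_response N → Spec_response N (response N)

-- ===== LEMMAS AND PROOFS =====

-- prefix sums of the increment tuple d: exactly the chain VALUES B stores
def pfxFrom (a : Int) : List Int → List Int
  | [] => []
  | v :: d => (a + v) :: pfxFrom (a + v) d

-- the level machine (proof-only): children of a chain w.r.t. the level-START array L
def chilM (N i : Int) (L : Array Int) (d : List Int) : List (List Int) :=
  (pfxFrom 0 d).filterMap (fun s =>
    if d.sum + s ≤ N ∧ i ≤ pvGet L (d.sum + s) 0 then some (d ++ [s]) else none)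

def applyEnd (i : Int) (st : Array Int × Int) (u : Int) : Array Int × Int :=
  if i < pvGet st.1 u 0 then (pvSet st.1 u i, st.2 - 1) else st

def applyEnds (i : Int) (st : Array Int × Int) (us : List Int) : Array Int × Int :=
  us.foldl (applyEnd i) st

def mach (N : Int) (L0 : Array Int) (C0 : Int) : Nat → List (List Int) × Array Int × Int
  | 0 => ([[1]], L0, C0)
  | k+1 =>
    let m := mach N L0 C0 k
    let F' := m.1.flatMap (chilM N ((k : Int) + 1) m.2.1)
    (F', applyEnds ((k : Int) + 1) m.2 (F'.map List.sum))

def machRun (N : Int) (L0 : Array Int) (C0 : Int) : Nat → Nat → Array Int × Int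
  | 0, k => (mach N L0 C0 k).2
  | fuel+1, k =>
    if 0 < (mach N L0 C0 k).2.2 then machRun N L0 C0 fuel (k + 1) else (mach N L0 C0 k).2

-- descendant end-values of chain d, levels jm1+1 … jm1+k+1 (the level-b slice of the DFS tree)
def dEnds (N : Int) (L0 : Array Int) (C0 : Int) : Nat → Nat → List Int → List Int
  | 0, jm1, d =>
    (pfxFrom 0 d).filterMap (fun s =>
      if d.sum + s ≤ N ∧ ((jm1 : Int) + 1) ≤ pvGet (mach N L0 C0 jm1).2.1 (d.sum + s) 0
      then some (d.sum + s) else none)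
  | k+1, jm1, d =>
    (pfxFrom 0 d).flatMap (fun s =>
      if d.sum + s ≤ N ∧ ((jm1 : Int) + 1) ≤ pvGet (mach N L0 C0 jm1).2.1 (d.sum + s) 0
      then dEnds N L0 C0 k (jm1 + 1) (d ++ [s]) else [])

-- ---- basic get/set facts ----
lemma stab_getD (L : Array Int) (u w v : Int) (hu : 0 ≤ u) (hw : 0 ≤ w) :
    pvGet (pvSet L u v) w 0 =
      if w = u ∧ u.toNat < L.size then v else pvGet L w 0 := by
  unfold pvGet pvSet
  simp only [Array.getD_eq_getD_getElem?, Array.getElem?_setIfInBounds]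
  by_cases h : w = u
  · subst h
    by_cases hr : w.toNat < L.size
    · simp [hr]
    · simp [hr]
  · have hne : u.toNat ≠ w.toNat := by omega
    simp [hne, h]

-- applyEnd / applyEnds only turn entries > i into i: every predicate 'j ≤ ·' with j ≤ i is stable
lemma applyEnd_pred (i j u w : Int) (st : Array Int × Int) (hji : j ≤ i) (hu : 0 ≤ u) (hw : 0 ≤ w) :
    (j ≤ pvGet (applyEnd i st u).1 w 0) ↔ (j ≤ pvGet st.1 w 0) := by
  unfold applyEnd
  split_ifs with h
  · rw [stab_getD st.1 u w i hu hw]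
    split_ifs with h2
    · rcases h2 with ⟨hwu, _⟩
      rw [hwu]
      constructor <;> intro _ <;> omega
    · exact Iff.rfl
  · exact Iff.rfl

lemma applyEnds_pred (i j w : Int) (st : Array Int × Int) (us : List Int)
    (hji : j ≤ i) (hus : ∀ u ∈ us, 0 ≤ u) (hw : 0 ≤ w) :
    (j ≤ pvGet (applyEnds i st us).1 w 0) ↔ (j ≤ pvGet st.1 w 0) := by
  induction us generalizing st with
  | nil => exact Iff.rfl
  | cons u us ih =>
    have h1 := applyEnd_pred i j u w st hji (hus u (by simp)) hw
    have h2 := ih (applyEnd i st u) (fun x hx => hus x (by simp [hx]))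
    simpa [applyEnds, List.foldl_cons] using h2.trans h1

lemma applyEnds_append (i : Int) (st : Array Int × Int) (us vs : List Int) :
    applyEnds i st (us ++ vs) = applyEnds i (applyEnds i st us) vs := by
  simp [applyEnds, List.foldl_append]

-- ---- positivity of machine chains ----
def PosChain (d : List Int) : Prop := d ≠ [] ∧ ∀ x ∈ d, 1 ≤ x

lemma pfxFrom_pos (d : List Int) (a : Int) (ha : 0 ≤ a) (hd : ∀ x ∈ d, 1 ≤ x) :
    ∀ s ∈ pfxFrom a d, 1 ≤ s := by
  induction d generalizing a with
  | nil => simp [pfxFrom]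
  | cons v d ih =>
    intro s hs
    simp only [pfxFrom, List.mem_cons] at hs
    rcases hs with h | h
    · have := hd v (by simp); omega
    · exact ih (a + v) (by have := hd v (by simp); omega) (fun x hx => hd x (by simp [hx])) s h

lemma pfxFrom_append_singleton (a : Int) (d : List Int) (v : Int) :
    pfxFrom a (d ++ [v]) = pfxFrom a d ++ [a + d.sum + v] := by
  induction d generalizing a with
  | nil => simp [pfxFrom]
  | cons x d ih =>
    simp only [List.cons_append, pfxFrom, ih (a + x), List.sum_cons]
    ring_nf

lemma sum_pos_of_posChain (d : List Int) (h : PosChain d) : 1 ≤ d.sum := by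
  rcases h with ⟨hne, hpos⟩
  rcases d with _ | ⟨x, d⟩
  · exact absurd rfl hne
  · have hx := hpos x (by simp)
    have : 0 ≤ d.sum := List.sum_nonneg (fun y hy => by have := hpos y (by simp [hy]); omega)
    simp only [List.sum_cons]; omega

lemma chilM_pos (N i : Int) (L : Array Int) (d : List Int) (hd : PosChain d) :
    ∀ c ∈ chilM N i L d, PosChain c := by
  intro c hc
  simp only [chilM, List.mem_filterMap] at hc
  rcases hc with ⟨s, hs, hc⟩
  split_ifs at hc with h
  · cases hc
    refine ⟨by simp, fun x hx => ?_⟩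
    rcases List.mem_append.mp hx with h' | h'
    · exact hd.2 x h'
    · have : x = s := by simpa using h'
      subst this
      exact pfxFrom_pos d 0 le_rfl hd.2 x hs

lemma mach_pos (N : Int) (L0 : Array Int) (C0 : Int) (k : Nat) :
    ∀ d ∈ (mach N L0 C0 k).1, PosChain d := by
  induction k with
  | zero =>
    intro d hd
    simp only [mach, List.mem_singleton] at hd
    subst hd
    exact ⟨by simp, by simp⟩
  | succ k ih =>
    intro d hd
    simp only [mach, List.mem_flatMap] at hd
    rcases hd with ⟨c, hc, hd⟩
    exact chilM_pos _ _ _ c (ih c hc) d hd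

lemma chilM_ends (N i : Int) (L : Array Int) (d : List Int) :
    (chilM N i L d).map List.sum =
      (pfxFrom 0 d).filterMap (fun s =>
        if d.sum + s ≤ N ∧ i ≤ pvGet L (d.sum + s) 0 then some (d.sum + s) else none) := by
  simp only [chilM, List.map_filterMap]
  congr 1
  funext s
  split_ifs <;> simp

lemma ends_nonneg (N i : Int) (L : Array Int) (d : List Int) (hd : PosChain d) :
    ∀ u ∈ (chilM N i L d).map List.sum, 0 ≤ u := by
  intro u hu
  simp only [List.mem_map] at hu
  rcases hu with ⟨c, hc, rfl⟩
  have := sum_pos_of_posChain c (chilM_pos N i L d hd c hc)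
  omega

lemma mach_ends_nonneg (N : Int) (L0 : Array Int) (C0 : Int) (k : Nat) :
    ∀ u ∈ (mach N L0 C0 k).1.map List.sum, 0 ≤ u := by
  intro u hu
  simp only [List.mem_map] at hu
  rcases hu with ⟨c, hc, rfl⟩
  have := sum_pos_of_posChain c (mach_pos N L0 C0 k c hc)
  omega

-- condition thresholds are stable across later machine levels
lemma mach_L_pred (N : Int) (L0 : Array Int) (C0 : Int) (j w : Int) (hw : 0 ≤ w) :
    ∀ k m : Nat, k ≤ m → j ≤ (k : Int) + 1 →
      ((j ≤ pvGet (mach N L0 C0 m).2.1 w 0) ↔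
       (j ≤ pvGet (mach N L0 C0 k).2.1 w 0)) := by
  intro k m hkm hj
  induction m with
  | zero =>
    have : k = 0 := by omega
    subst this; exact Iff.rfl
  | succ m ih =>
    rcases Nat.lt_or_ge k (m+1) with h | h
    · have hk : k ≤ m := by omega
      have step :
          (j ≤ pvGet (mach N L0 C0 (m+1)).2.1 w 0) ↔
          (j ≤ pvGet (mach N L0 C0 m).2.1 w 0) := by
        have hF : (mach N L0 C0 (m+1)).1 =
            (mach N L0 C0 m).1.flatMap (chilM N ((m : Int) + 1) (mach N L0 C0 m).2.1) := by
          conv_lhs => rw [mach]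
        have hL : (mach N L0 C0 (m+1)).2 =
            applyEnds ((m : Int) + 1) (mach N L0 C0 m).2
              ((mach N L0 C0 (m+1)).1.map List.sum) := by
          conv_lhs => rw [mach]
          rw [hF]
        rw [hL]
        have hkm' : (k : Int) ≤ (m : Int) := by exact_mod_cast hk
        exact applyEnds_pred ((m : Int) + 1) j w (mach N L0 C0 m).2 _
          (by omega) (mach_ends_nonneg N L0 C0 (m+1)) hw
      exact step.trans (ih hk)
    · have : k = m + 1 := by omega
      subst this; exact Iff.rfl

-- ---- A-side: one chain, then one level, equals the static machine step ----
lemma push_append_toArray {α : Type} (dn : Array α) (x : α) (l : List α) :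
    (dn.push x) ++ l.toArray = dn ++ (x :: l).toArray := by
  rw [← Array.toList_inj]
  simp

-- generalized inner-loop lemma for chainA: fold over the rest of d, prefix base a, visited ends V
lemma chainA_gen (N i total : Int) (d : List Int) (st0 : Array Int × Int) :
    ∀ (d' : List Int) (a : Int) (dn : Array (List Int)) (V : List Int),
      (∀ s ∈ pfxFrom a d', 0 ≤ total + s) → (∀ u ∈ V, 0 ≤ u) →
      d'.foldl (fun (st : Int × Array (List Int) × Array Int × Int) v =>
          let s := st.1 + v
          if total + s ≤ N ∧ i ≤ pvGet st.2.2.1 (total + s) 0 then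
            if i < pvGet st.2.2.1 (total + s) 0 then
              (s, st.2.1.push (d ++ [s]), pvSet st.2.2.1 (total + s) i, st.2.2.2 - 1)
            else (s, st.2.1.push (d ++ [s]), st.2.2.1, st.2.2.2)
          else (s, st.2.1, st.2.2.1, st.2.2.2))
        (a, dn, (applyEnds i st0 V).1, (applyEnds i st0 V).2) =
      (a + d'.sum,
       dn ++ ((pfxFrom a d').filterMap (fun s =>
         if total + s ≤ N ∧ i ≤ pvGet st0.1 (total + s) 0 then some (d ++ [s]) else none)).toArray,
       (applyEnds i st0 (V ++ (pfxFrom a d').filterMap (fun s =>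
         if total + s ≤ N ∧ i ≤ pvGet st0.1 (total + s) 0 then some (total + s) else none))).1,
       (applyEnds i st0 (V ++ (pfxFrom a d').filterMap (fun s =>
         if total + s ≤ N ∧ i ≤ pvGet st0.1 (total + s) 0 then some (total + s) else none))).2) := by
  intro d'
  induction d' with
  | nil => intro a dn V h1 h2; simp [pfxFrom]
  | cons v d'' ih =>
    intro a dn V h1 h2
    have hmem : (a + v) ∈ pfxFrom a (v :: d'') := by simp [pfxFrom]
    have hu : 0 ≤ total + (a + v) := h1 _ hmem
    have hcond : (i ≤ pvGet (applyEnds i st0 V).1 (total + (a + v)) 0) ↔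
        (i ≤ pvGet st0.1 (total + (a + v)) 0) :=
      applyEnds_pred i i (total + (a + v)) st0 V le_rfl h2 hu
    simp only [List.foldl_cons]
    by_cases hc : total + (a + v) ≤ N ∧ i ≤ pvGet st0.1 (total + (a + v)) 0
    · rw [if_pos (by exact ⟨hc.1, hcond.mpr hc.2⟩)]
      have hstep :
          (if i < pvGet (applyEnds i st0 V).1 (total + (a + v)) 0 then
            (a + v, dn.push (d ++ [a + v]),
              pvSet (applyEnds i st0 V).1 (total + (a + v)) i,
              (applyEnds i st0 V).2 - 1)
          else (a + v, dn.push (d ++ [a + v]), (applyEnds i st0 V).1, (applyEnds i st0 V).2)) =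
          (a + v, dn.push (d ++ [a + v]),
            (applyEnds i st0 (V ++ [total + (a + v)])).1,
            (applyEnds i st0 (V ++ [total + (a + v)])).2) := by
        rw [applyEnds_append]
        show _ = (a + v, dn.push (d ++ [a + v]),
          (applyEnd i (applyEnds i st0 V) (total + (a + v))).1,
          (applyEnd i (applyEnds i st0 V) (total + (a + v))).2)
        unfold applyEnd
        split_ifs <;> rfl
      rw [hstep]
      rw [ih (a + v) (dn.push (d ++ [a + v])) (V ++ [total + (a + v)])
        (fun s hs => h1 s (by simp [pfxFrom, hs]))
        (by intro u hu'; rcases List.mem_append.mp hu' with h | h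
            · exact h2 u h
            · simpa using (by simpa using h : u = total + (a + v)) ▸ hu)]
      simp only [pfxFrom, List.filterMap_cons, if_pos hc, List.sum_cons, Prod.mk.injEq]
      refine ⟨by omega, push_append_toArray dn _ _, ?_, ?_⟩
      · exact congrArg (fun l => (applyEnds i st0 l).1) (by simp)
      · exact congrArg (fun l => (applyEnds i st0 l).2) (by simp)
    · rw [if_neg (by intro h; exact hc ⟨h.1, hcond.mp h.2⟩)]
      rw [ih (a + v) dn V (fun s hs => h1 s (by simp [pfxFrom, hs])) h2]
      simp only [pfxFrom, List.filterMap_cons, if_neg hc, List.sum_cons, Prod.mk.injEq]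
      and_intros <;> first | trivial | omega


lemma chainA_static (N i : Int) (d : List Int) (dn : Array (List Int))
    (st0 : Array Int × Int) (V : List Int)
    (hd : PosChain d) (hV : ∀ u ∈ V, 0 ≤ u) :
    chainA N i d dn (applyEnds i st0 V).1 (applyEnds i st0 V).2 =
      (dn ++ (chilM N i st0.1 d).toArray,
        applyEnds i st0 (V ++ (chilM N i st0.1 d).map List.sum)) := by
  have h1 : ∀ s ∈ pfxFrom 0 d, 0 ≤ d.sum + s := by
    intro s hs
    have := pfxFrom_pos d 0 le_rfl hd.2 s hs
    have := sum_pos_of_posChain d hd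
    omega
  have hg := chainA_gen N i d.sum d st0 d 0 dn V h1 hV
  show (List.foldl
      (fun (st : Int × Array (List Int) × Array Int × Int) v =>
        let s := st.1 + v
        if d.sum + s ≤ N ∧ i ≤ pvGet st.2.2.1 (d.sum + s) 0 then
          if i < pvGet st.2.2.1 (d.sum + s) 0 then
            (s, st.2.1.push (d ++ [s]), pvSet st.2.2.1 (d.sum + s) i, st.2.2.2 - 1)
          else (s, st.2.1.push (d ++ [s]), st.2.2.1, st.2.2.2)
        else (s, st.2.1, st.2.2.1, st.2.2.2))
      (0, dn, (applyEnds i st0 V).1, (applyEnds i st0 V).2) d).2 = _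
  rw [hg, chilM_ends]
  rfl

lemma levelA_gen (N i : Int) (st0 : Array Int × Int) :
    ∀ (F : List (List Int)) (acc : Array (List Int)) (V : List Int),
      (∀ d ∈ F, PosChain d) → (∀ u ∈ V, 0 ≤ u) →
      F.foldl (fun st d => chainA N i d st.1 st.2.1 st.2.2) (acc, applyEnds i st0 V) =
        (acc ++ (F.flatMap (chilM N i st0.1)).toArray,
          applyEnds i st0 (V ++ (F.flatMap (chilM N i st0.1)).map List.sum)) := by
  intro F
  induction F with
  | nil => intro acc V _ _; simp
  | cons d F ih =>
    intro acc V hF hV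
    have hst : chainA N i d acc (applyEnds i st0 V).1 (applyEnds i st0 V).2 =
        (acc ++ (chilM N i st0.1 d).toArray,
          applyEnds i st0 (V ++ (chilM N i st0.1 d).map List.sum)) :=
      chainA_static N i d acc st0 V (hF d (by simp)) hV
    simp only [List.foldl_cons, hst]
    rw [ih (acc ++ (chilM N i st0.1 d).toArray) (V ++ (chilM N i st0.1 d).map List.sum)
      (fun x hx => hF x (by simp [hx]))
      (by intro u hu
          rcases List.mem_append.mp hu with h | h
          · exact hV u h
          · exact ends_nonneg N i st0.1 d (hF d (by simp)) u h)]
    simp [List.append_assoc, ← Array.toList_inj]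

lemma levelA_static (N i : Int) (F : List (List Int)) (st0 : Array Int × Int)
    (hF : ∀ d ∈ F, PosChain d) :
    levelA N i F.toArray st0.1 st0.2 =
      ((F.flatMap (chilM N i st0.1)).toArray,
        applyEnds i st0 ((F.flatMap (chilM N i st0.1)).map List.sum)) := by
  have := levelA_gen N i st0 F #[] [] hF (by simp)
  unfold levelA
  rw [List.foldl_toArray]
  simpa using this

lemma loopA_machRun (N : Int) (L0 : Array Int) (C0 : Int) :
    ∀ (fuel k : Nat),
      loopA N fuel (k : Int) (mach N L0 C0 k).1.toArray (mach N L0 C0 k).2.1 (mach N L0 C0 k).2.2 =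
        machRun N L0 C0 fuel k := by
  intro fuel
  induction fuel with
  | zero => intro k; rfl
  | succ fuel ih =>
    intro k
    simp only [loopA, machRun]
    by_cases h : 0 < (mach N L0 C0 k).2.2
    · rw [if_pos h, if_pos h]
      have hl := levelA_static N ((k : Int) + 1) (mach N L0 C0 k).1 (mach N L0 C0 k).2
        (mach_pos N L0 C0 k)
      simp only [hl]
      have hmach : mach N L0 C0 (k+1) =
          ((mach N L0 C0 k).1.flatMap (chilM N ((k : Int) + 1) (mach N L0 C0 k).2.1),
            applyEnds ((k : Int) + 1) (mach N L0 C0 k).2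
              (((mach N L0 C0 k).1.flatMap (chilM N ((k : Int) + 1) (mach N L0 C0 k).2.1)).map
                List.sum)) := by
        conv_lhs => rw [mach]
      have := ih (k+1)
      rw [hmach] at this
      push_cast at this
      convert this using 2
    · rw [if_neg h, if_neg h]

-- ---- B-side: the budget-b DFS applies exactly the level-b machine updates ----
lemma applyEnds_snoc (i : Int) (st : Array Int × Int) (us : List Int) (u : Int) :
    applyEnd i (applyEnds i st us) u = applyEnds i st (us ++ [u]) := by
  simp [applyEnds, List.foldl_append]

lemma applyEnd_eq (i : Int) (st : Array Int × Int) (u : Int) :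
    (if i < pvGet st.1 u 0 then (pvSet st.1 u i, st.2 - 1) else st) =
      applyEnd i st u := rfl

lemma posChain_snoc (d : List Int) (hd : PosChain d) (v : Int) (hv : 1 ≤ v) :
    PosChain (d ++ [v]) := by
  refine ⟨by simp, fun x hx => ?_⟩
  rcases List.mem_append.mp hx with h | h
  · exact hd.2 x h
  · simpa using (by simpa using h : x = v) ▸ hv

lemma dEnds_nonneg (N : Int) (L0 : Array Int) (C0 : Int) :
    ∀ (k jm1 : Nat) (d : List Int), PosChain d → ∀ u ∈ dEnds N L0 C0 k jm1 d, 0 ≤ u := by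
  intro k
  induction k with
  | zero =>
    intro jm1 d hd u hu
    simp only [dEnds, List.mem_filterMap] at hu
    rcases hu with ⟨s, hs, hu⟩
    split_ifs at hu with h
    · cases hu
      have := pfxFrom_pos d 0 le_rfl hd.2 s hs
      have := sum_pos_of_posChain d hd
      omega
  | succ k ih =>
    intro jm1 d hd u hu
    simp only [dEnds, List.mem_flatMap] at hu
    rcases hu with ⟨s, hs, hu⟩
    split_ifs at hu with h
    · have hs1 := pfxFrom_pos d 0 le_rfl hd.2 s hs
      exact ih (jm1+1) (d ++ [s]) ⟨by simp, by
        intro x hx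
        rcases List.mem_append.mp hx with h' | h'
        · exact hd.2 x h'
        · simpa using (by simpa using h' : x = s) ▸ hs1⟩ u hu
    · simp at hu

lemma dfsB_dEnds (N : Int) (L0 : Array Int) (C0 : Int) :
    ∀ (k jm1 : Nat) (d : List Int) (V : List Int) (b : Nat),
      b = jm1 + k + 1 → PosChain d → (∀ u ∈ V, 0 ≤ u) →
      dfsB N (k+1) (pfxFrom 0 d) d.sum ((jm1 : Int) + 1) ((b : Int))
          (applyEnds (b : Int) (mach N L0 C0 (b-1)).2 V) =
        applyEnds (b : Int) (mach N L0 C0 (b-1)).2 (V ++ dEnds N L0 C0 k jm1 d) := by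
  intro k
  induction k with
  | zero =>
    intro jm1 d V b hb hd hV
    subst hb
    have hsum := sum_pos_of_posChain d hd
    have hb1 : jm1 + 0 + 1 - 1 = jm1 := by omega
    have hcast : ((jm1 + 0 + 1 : Nat) : Int) = (jm1 : Int) + 1 := by push_cast; ring
    rw [hb1, hcast]
    suffices h : ∀ (us V' : List Int), (∀ v ∈ us, v ∈ pfxFrom 0 d) → (∀ u ∈ V', 0 ≤ u) →
        us.foldl
          (fun (st : Array Int × Int) v =>
            if d.sum + v ≤ N ∧ (jm1 : Int) + 1 ≤ pvGet st.1 (d.sum + v) 0 then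
              applyEnd ((jm1 : Int) + 1) st (d.sum + v)
            else st)
          (applyEnds ((jm1 : Int) + 1) (mach N L0 C0 jm1).2 V') =
        applyEnds ((jm1 : Int) + 1) (mach N L0 C0 jm1).2
          (V' ++ us.filterMap (fun s =>
            if d.sum + s ≤ N ∧ (jm1 : Int) + 1 ≤
                pvGet (mach N L0 C0 jm1).2.1 (d.sum + s) 0
            then some (d.sum + s) else none)) by
      have hh := h (pfxFrom 0 d) V (fun v hv => hv) hV
      show (pfxFrom 0 d).foldl
          (fun (st : Array Int × Int) v =>
            if d.sum + v ≤ N ∧ (jm1 : Int) + 1 ≤ pvGet st.1 (d.sum + v) 0 then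
              if (jm1 : Int) + 1 = (jm1 : Int) + 1 then
                if (jm1 : Int) + 1 < pvGet st.1 (d.sum + v) 0 then
                  (pvSet st.1 (d.sum + v) ((jm1 : Int) + 1), st.2 - 1)
                else st
              else dfsB N 0 (pfxFrom 0 d ++ [d.sum + v]) (d.sum + v) ((jm1 : Int) + 1 + 1)
                ((jm1 : Int) + 1) st
            else st)
          (applyEnds ((jm1 : Int) + 1) (mach N L0 C0 jm1).2 V) =
        applyEnds ((jm1 : Int) + 1) (mach N L0 C0 jm1).2 (V ++ dEnds N L0 C0 0 jm1 d)
      simp only [applyEnd_eq, if_true]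
      rw [hh]
      simp only [dEnds]
    intro us
    induction us with
    | nil => intro V' _ _; simp
    | cons v us ihus =>
      intro V' husm hV'
      have hv1 : 1 ≤ v := pfxFrom_pos d 0 le_rfl hd.2 v (husm v (by simp))
      have hc0 : 0 ≤ d.sum + v := by omega
      have hstab := applyEnds_pred ((jm1 : Int) + 1) ((jm1 : Int) + 1) (d.sum + v)
        (mach N L0 C0 jm1).2 V' le_rfl hV' hc0
      simp only [List.foldl_cons, List.filterMap_cons]
      by_cases hc : d.sum + v ≤ N ∧
          (jm1 : Int) + 1 ≤ pvGet (mach N L0 C0 jm1).2.1 (d.sum + v) 0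
      · rw [if_pos ⟨hc.1, hstab.mpr hc.2⟩, applyEnds_snoc, if_pos hc]
        rw [ihus (V' ++ [d.sum + v]) (fun x hx => husm x (by simp [hx]))
          (by intro u hu
              rcases List.mem_append.mp hu with h' | h'
              · exact hV' u h'
              · simpa using (by simpa using h' : u = d.sum + v) ▸ hc0)]
        simp [List.append_assoc]
      · rw [if_neg (by intro hcc; exact hc ⟨hcc.1, hstab.mp hcc.2⟩), if_neg hc]
        rw [ihus V' (fun x hx => husm x (by simp [hx])) hV']
  | succ k ih =>
    intro jm1 d V b hb hd hV
    subst hb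
    have hb1 : jm1 + (k + 1) + 1 - 1 = jm1 + k + 1 := by omega
    rw [hb1]
    have hne : ((jm1 : Int) + 1) ≠ ((jm1 + (k + 1) + 1 : Nat) : Int) := by push_cast; omega
    have hjb : ((jm1 : Int) + 1) ≤ ((jm1 + (k + 1) + 1 : Nat) : Int) := by push_cast; omega
    suffices h : ∀ (us V' : List Int), (∀ v ∈ us, v ∈ pfxFrom 0 d) → (∀ u ∈ V', 0 ≤ u) →
        us.foldl
          (fun (st : Array Int × Int) v =>
            if d.sum + v ≤ N ∧ (jm1 : Int) + 1 ≤ pvGet st.1 (d.sum + v) 0 then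
              dfsB N (k+1) (pfxFrom 0 d ++ [d.sum + v]) (d.sum + v) ((jm1 : Int) + 1 + 1)
                ((jm1 + (k + 1) + 1 : Nat) : Int) st
            else st)
          (applyEnds ((jm1 + (k + 1) + 1 : Nat) : Int) (mach N L0 C0 (jm1 + k + 1)).2 V') =
        applyEnds ((jm1 + (k + 1) + 1 : Nat) : Int) (mach N L0 C0 (jm1 + k + 1)).2
          (V' ++ us.flatMap (fun s =>
            if d.sum + s ≤ N ∧ (jm1 : Int) + 1 ≤
                pvGet (mach N L0 C0 jm1).2.1 (d.sum + s) 0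
            then dEnds N L0 C0 k (jm1 + 1) (d ++ [s]) else [])) by
      have hh := h (pfxFrom 0 d) V (fun v hv => hv) hV
      show (pfxFrom 0 d).foldl
          (fun (st : Array Int × Int) v =>
            if d.sum + v ≤ N ∧ (jm1 : Int) + 1 ≤ pvGet st.1 (d.sum + v) 0 then
              if (jm1 : Int) + 1 = ((jm1 + (k + 1) + 1 : Nat) : Int) then
                if (jm1 : Int) + 1 < pvGet st.1 (d.sum + v) 0 then
                  (pvSet st.1 (d.sum + v) ((jm1 : Int) + 1), st.2 - 1)
                else st
              else dfsB N (k+1) (pfxFrom 0 d ++ [d.sum + v]) (d.sum + v) ((jm1 : Int) + 1 + 1)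
                ((jm1 + (k + 1) + 1 : Nat) : Int) st
            else st)
          (applyEnds ((jm1 + (k + 1) + 1 : Nat) : Int) (mach N L0 C0 (jm1 + k + 1)).2 V) =
        applyEnds ((jm1 + (k + 1) + 1 : Nat) : Int) (mach N L0 C0 (jm1 + k + 1)).2
          (V ++ dEnds N L0 C0 (k+1) jm1 d)
      simp only [if_neg hne]
      rw [hh]
      simp only [dEnds]
    intro us
    induction us with
    | nil => intro V' _ _; simp
    | cons v us ihus =>
      intro V' husm hV'
      have hv1 : 1 ≤ v := pfxFrom_pos d 0 le_rfl hd.2 v (husm v (by simp))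
      have hsum := sum_pos_of_posChain d hd
      have hc0 : 0 ≤ d.sum + v := by omega
      have hstab := applyEnds_pred ((jm1 + (k + 1) + 1 : Nat) : Int) ((jm1 : Int) + 1)
        (d.sum + v) (mach N L0 C0 (jm1 + k + 1)).2 V' hjb hV' hc0
      have hlev := mach_L_pred N L0 C0 ((jm1 : Int) + 1) (d.sum + v) hc0 jm1 (jm1 + k + 1)
        (by omega) le_rfl
      simp only [List.foldl_cons, List.flatMap_cons]
      by_cases hc : d.sum + v ≤ N ∧
          (jm1 : Int) + 1 ≤ pvGet (mach N L0 C0 jm1).2.1 (d.sum + v) 0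
      · rw [if_pos ⟨hc.1, hstab.mpr (hlev.mpr hc.2)⟩, if_pos hc]
        have hchild : PosChain (d ++ [v]) := posChain_snoc d hd v hv1
        have hrec := ih (jm1 + 1) (d ++ [v]) V' (jm1 + (k + 1) + 1) (by omega) hchild hV'
        rw [pfxFrom_append_singleton, zero_add] at hrec
        have hsum2 : (d ++ [v]).sum = d.sum + v := by simp
        rw [hsum2] at hrec
        have hcast2 : ((jm1 + 1 : Nat) : Int) + 1 = (jm1 : Int) + 1 + 1 := by push_cast; ring
        rw [hcast2] at hrec
        have hb2 : jm1 + (k + 1) + 1 - 1 = jm1 + k + 1 := by omega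
        rw [hb2] at hrec
        rw [hrec]
        rw [ihus (V' ++ dEnds N L0 C0 k (jm1 + 1) (d ++ [v]))
          (fun x hx => husm x (by simp [hx]))
          (by intro u hu
              rcases List.mem_append.mp hu with h' | h'
              · exact hV' u h'
              · exact dEnds_nonneg N L0 C0 k (jm1 + 1) (d ++ [v]) hchild u h')]
        simp [List.append_assoc]
      · rw [if_neg (by intro hcc; exact hc ⟨hcc.1, hlev.mp (hstab.mp hcc.2)⟩), if_neg hc]
        rw [ihus V' (fun x hx => husm x (by simp [hx])) hV']
        simp

lemma flatMap_filterMap_ite {α β γ : Type} (l : List α) (p : α → Prop) [DecidablePred p]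
    (m : α → β) (g : β → List γ) :
    (l.filterMap (fun s => if p s then some (m s) else none)).flatMap g =
      l.flatMap (fun s => if p s then g (m s) else []) := by
  induction l with
  | nil => simp
  | cons a l ih => by_cases h : p a <;> simp [h, ih]

lemma flatMap_dEnds (N : Int) (L0 : Array Int) (C0 : Int) :
    ∀ (k jm1 : Nat),
      ((mach N L0 C0 jm1).1.flatMap (dEnds N L0 C0 k jm1)) =
        (mach N L0 C0 (jm1 + k + 1)).1.map List.sum := by
  intro k
  induction k with
  | zero =>
    intro jm1
    have hm : (mach N L0 C0 (jm1 + 0 + 1)).1 =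
        (mach N L0 C0 jm1).1.flatMap (chilM N ((jm1 : Int) + 1) (mach N L0 C0 jm1).2.1) := by
      rw [Nat.add_zero]
      conv_lhs => rw [mach]
    rw [hm, List.map_flatMap]
    have hf : ∀ d, (chilM N ((jm1 : Int) + 1) (mach N L0 C0 jm1).2.1 d).map List.sum =
        dEnds N L0 C0 0 jm1 d := by
      intro d
      rw [chilM_ends]
      rfl
    simp only [hf]
  | succ k ih =>
    intro jm1
    have hstep : ∀ d, dEnds N L0 C0 (k+1) jm1 d =
        (chilM N ((jm1 : Int) + 1) (mach N L0 C0 jm1).2.1 d).flatMap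
          (dEnds N L0 C0 k (jm1 + 1)) := by
      intro d
      simp only [dEnds, chilM, flatMap_filterMap_ite]
    have hm : (mach N L0 C0 (jm1 + 1)).1 =
        (mach N L0 C0 jm1).1.flatMap (chilM N ((jm1 : Int) + 1) (mach N L0 C0 jm1).2.1) := by
      conv_lhs => rw [mach]
    calc (mach N L0 C0 jm1).1.flatMap (dEnds N L0 C0 (k+1) jm1)
        = (mach N L0 C0 jm1).1.flatMap (fun d =>
            (chilM N ((jm1 : Int) + 1) (mach N L0 C0 jm1).2.1 d).flatMap
              (dEnds N L0 C0 k (jm1 + 1))) := by rw [funext hstep]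
      _ = ((mach N L0 C0 jm1).1.flatMap
            (chilM N ((jm1 : Int) + 1) (mach N L0 C0 jm1).2.1)).flatMap
              (dEnds N L0 C0 k (jm1 + 1)) := List.flatMap_assoc.symm
      _ = (mach N L0 C0 (jm1 + 1)).1.flatMap (dEnds N L0 C0 k (jm1 + 1)) := by rw [hm]
      _ = (mach N L0 C0 ((jm1 + 1) + k + 1)).1.map List.sum := ih (jm1 + 1)
      _ = (mach N L0 C0 (jm1 + (k + 1) + 1)).1.map List.sum := by
            rw [show (jm1 + 1) + k + 1 = jm1 + (k + 1) + 1 from by omega]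

lemma loopB_machRun (N : Int) (L0 : Array Int) (C0 : Int) :
    ∀ (fuel k : Nat), loopB N fuel (k : Int) (mach N L0 C0 k).2 = machRun N L0 C0 fuel k := by
  intro fuel
  induction fuel with
  | zero => intro k; rfl
  | succ fuel ih =>
    intro k
    simp only [loopB, machRun]
    by_cases h : 0 < (mach N L0 C0 k).2.2
    · rw [if_pos h, if_pos h]
      have hdfs := dfsB_dEnds N L0 C0 k 0 [1] [] (k+1) (by omega) ⟨by simp, by simp⟩ (by simp)
      have h1 : pfxFrom 0 [1] = [1] := by norm_num [pfxFrom]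
      have h2 : ([1] : List Int).sum = 1 := by simp
      have h3 : ((0 : Nat) : Int) + 1 = 1 := by norm_num
      have h4 : k + 1 - 1 = k := by omega
      rw [h1, h2, h3, h4] at hdfs
      have h5 : applyEnds ((k + 1 : Nat) : Int) (mach N L0 C0 k).2 [] = (mach N L0 C0 k).2 := rfl
      rw [h5] at hdfs
      have h6 : ((k : Int) + 1).toNat = k + 1 := by omega
      have h7 : ((k : Int) + 1) = ((k + 1 : Nat) : Int) := by push_cast; ring
      rw [h6, h7, hdfs]
      have h8 : dEnds N L0 C0 k 0 [1] = (mach N L0 C0 (k + 1)).1.map List.sum := by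
        have := flatMap_dEnds N L0 C0 k 0
        simpa [mach] using this
      rw [List.nil_append, h8]
      have h9 : applyEnds ((k + 1 : Nat) : Int) (mach N L0 C0 k).2
          ((mach N L0 C0 (k + 1)).1.map List.sum) = (mach N L0 C0 (k + 1)).2 := by
        conv_rhs => rw [mach]
        push_cast
        rfl
      rw [h9]
      exact ih (k + 1)
    · rw [if_neg h, if_neg h]

-- ===== VERDICT (by name: the statement is the Claim_ definition above) =====
theorem response_spec : Claim_equal_response := by
  intro N _ _
  unfold Spec_response response response_alt
  have hA := loopA_machRun N
    (pvSet ((PySem.List.pyRange 0 (N + 1) 1).map (fun j => j - 1)).toArray 0 0) (N - 3)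
    (N.toNat + 2) 0
  have hB := loopB_machRun N
    (pvSet ((PySem.List.pyRange 0 (N + 1) 1).map (fun j => j - 1)).toArray 0 0) (N - 3)
    (N.toNat + 2) 0
  simp only [mach, Nat.cast_zero] at hA hB
  show (loopA N (N.toNat + 2) 0 ([[1]] : List (List Int)).toArray
      (pvSet ((PySem.List.pyRange 0 (N + 1) 1).map (fun j => j - 1)).toArray 0 0)
      (N - 3)).1.toList.sum =
    (loopB N (N.toNat + 2) 0
      (pvSet ((PySem.List.pyRange 0 (N + 1) 1).map (fun j => j - 1)).toArray 0 0,
        N - 3)).1.toList.sum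
  rw [hA, hB]
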